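-- pv_equiv track=rewrite | github.com/MarioVik/VibeDnD | parsers/progression_parser.py | _read_table_headers
-- ===== SOURCE A (Python) =====
-- def _read_table_headers(lines: list[str], header_idx: int) -> tuple[list[str], int]:
--     """Read header lines from a table, return (headers, data_start_index)."""
--     headers = []
--     data_start = None
--     for i in range(header_idx, len(lines)):
--         stripped = lines[i].strip()
--         if stripped.isdigit() and int(stripped) >= 1:
--             data_start = i
--             break
--         if stripped:
--             headers.append(stripped)
--     return headers, data_start
-- ===== SOURCE B (Python) =====
-- def _read_table_headers(lines: list[str], header_idx: int) -> tuple[list[str], int]: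
--     """Two-pass version: locate the data-start boundary first, then filter headers."""
--     n = len(lines)
--     data_start = next(
--         (i for i in range(header_idx, n)
--          if lines[i].strip().isdigit() and int(lines[i].strip()) >= 1),
--         None)
--     end = n if data_start is None else data_start
--     headers = [s for s in (lines[i].strip() for i in range(header_idx, end)) if s]
--     return headers, data_start
-- ===== Notes on version B (the rewrite author's own statement) =====
-- stated objective: alternative
-- what changed: Replaced A's single fused loop (accumulate headers and break on the first numeric line) with two separate passes: a next()-over-generator scan that locates the data-start index, then a comprehension over range(header_idx, end) that keeps the non-empty stripped lines.
import Mathlib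
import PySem

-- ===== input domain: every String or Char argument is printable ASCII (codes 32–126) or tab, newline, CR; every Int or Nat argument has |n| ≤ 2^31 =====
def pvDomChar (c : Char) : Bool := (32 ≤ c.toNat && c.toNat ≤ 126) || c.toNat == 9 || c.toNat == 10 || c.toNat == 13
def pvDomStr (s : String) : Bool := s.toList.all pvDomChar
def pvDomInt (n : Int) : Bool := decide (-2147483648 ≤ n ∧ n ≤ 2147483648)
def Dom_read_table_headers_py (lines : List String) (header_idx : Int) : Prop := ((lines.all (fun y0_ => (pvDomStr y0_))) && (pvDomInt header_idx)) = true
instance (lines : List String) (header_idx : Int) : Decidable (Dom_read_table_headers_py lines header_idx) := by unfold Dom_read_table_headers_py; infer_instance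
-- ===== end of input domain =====

-- B replaces A's fused accumulate-and-break loop by two passes (locate the data-start index, then filter headers); alternative decomposition, same cost.


-- ===== PORT A =====
-- A's fused loop: accumulate headers, break with data_start on the first numeric (>= 1) line.
-- The 'none' branch of pyGet? is where Python raises IndexError; those inputs are excluded by Pre_.
def rthLoopA (lines : List String) : List Int → List String → List String × Option Int
  | [], headers => (headers, none)
  | i :: rest, headers =>
    match PySem.List.pyGet? lines i with
    | none => (headers, none)
    | some s =>
      let stripped := PySem.Str.strip s
      if PySem.Str.strIsdigit stripped && decide (1 ≤ (PySem.Int.ofStr? stripped).getD 0) then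
        (headers, some i)
      else if stripped ≠ "" then rthLoopA lines rest (headers ++ [stripped])
      else rthLoopA lines rest headers

def read_table_headers_py (lines : List String) (header_idx : Int) : List String × Option Int :=
  rthLoopA lines (PySem.List.pyRange header_idx (lines.length : Int) 1) []

-- ===== PORT B =====
-- B pass 1: the predicate "lines[i].strip().isdigit() and int(lines[i].strip()) >= 1".
def rthCond (lines : List String) (i : Int) : Bool :=
  match PySem.List.pyGet? lines i with
  | none => false
  | some s =>
    let t := PySem.Str.strip s
    PySem.Str.strIsdigit t && decide (1 ≤ (PySem.Int.ofStr? t).getD 0)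

-- B pass 2 body: keep lines[i].strip() when non-empty.
def rthKeep (lines : List String) (i : Int) : Option String :=
  match PySem.List.pyGet? lines i with
  | none => none
  | some s =>
    let t := PySem.Str.strip s
    if t = "" then none else some t

def read_table_headers_py_alt (lines : List String) (header_idx : Int) : List String × Option Int :=
  let n : Int := lines.length
  let data_start := (PySem.List.pyRange header_idx n 1).find? (rthCond lines)
  let e : Int := match data_start with | none => n | some d => d
  let headers := (PySem.List.pyRange header_idx e 1).filterMap (rthKeep lines)
  (headers, data_start)

-- ===== PRECONDITION & SPEC =====
-- Pre_ excludes exactly the inputs where Python A raises IndexError (the loop reaches an index below -len(lines)).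
def Pre_read_table_headers_py (lines : List String) (header_idx : Int) : Prop :=
  -(lines.length : Int) ≤ header_idx
instance (lines : List String) (header_idx : Int) : Decidable (Pre_read_table_headers_py lines header_idx) := by unfold Pre_read_table_headers_py; infer_instance
def pvWitness_read_table_headers_py : List String × Int := (["Level", " 0 ", "", " 1 ", "x"], 0)

def Spec_read_table_headers_py (lines : List String) (header_idx : Int) (out : List String × Option Int) : Prop := out = read_table_headers_py_alt lines header_idx
instance (lines : List String) (header_idx : Int) (out : List String × Option Int) : Decidable (Spec_read_table_headers_py lines header_idx out) := by unfold Spec_read_table_headers_py; infer_instance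

-- ===== CLAIM (what is proved, stated in full; the proofs are below) =====
def Claim_equal_read_table_headers_py : Prop := ∀ (lines : List String) (header_idx : Int), Dom_read_table_headers_py lines header_idx → Pre_read_table_headers_py lines header_idx → Spec_read_table_headers_py lines header_idx (read_table_headers_py lines header_idx)

-- ===== LEMMAS AND PROOFS =====

-- A's loop from index a, with accumulator acc, equals B's two-pass result from a (prepending acc).
theorem rth_main (lines : List String) :
    ∀ (k : Nat) (a : Int) (acc : List String),
      ((lines.length : Int) - a).toNat ≤ k → -(lines.length : Int) ≤ a →
      rthLoopA lines (PySem.List.pyRange a (lines.length : Int) 1) acc =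
        (acc ++ (read_table_headers_py_alt lines a).1, (read_table_headers_py_alt lines a).2) := by
  intro k
  induction k with
  | zero =>
    intro a acc hk _
    have hna : (lines.length : Int) ≤ a := by omega
    simp [PySem.List.pyRange_one_eq_nil hna, rthLoopA, read_table_headers_py_alt]
  | succ k ih =>
    intro a acc hk hlo
    by_cases hna : (lines.length : Int) ≤ a
    · simp [PySem.List.pyRange_one_eq_nil hna, rthLoopA, read_table_headers_py_alt]
    · have ha : a < (lines.length : Int) := by omega
      rw [PySem.List.pyRange_one_cons ha]
      obtain ⟨s, hs⟩ : ∃ s, PySem.List.pyGet? lines a = some s := by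
        cases hget : PySem.List.pyGet? lines a with
        | none =>
          rw [PySem.List.pyGet?_eq_none_iff] at hget
          exact absurd ⟨hlo, ha⟩ hget
        | some s => exact ⟨s, rfl⟩
      by_cases hc : rthCond lines a = true
      · -- data line found: A breaks, B's find? returns a, B's header range is empty
        have hcond : (PySem.Str.strIsdigit (PySem.Str.strip s) &&
            decide (1 ≤ (PySem.Int.ofStr? (PySem.Str.strip s)).getD 0)) = true := by
          simpa [rthCond, hs] using hc
        have hfind : (PySem.List.pyRange a (lines.length : Int) 1).find? (rthCond lines) = some a := by
          rw [PySem.List.pyRange_one_cons ha, List.find?_cons_of_pos hc]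
        simp only [rthLoopA, hs]
        rw [if_pos hcond]
        simp [read_table_headers_py_alt, hfind, PySem.List.pyRange_one_eq_nil (le_refl a)]
      · -- not a data line: step both sides
        have hcond : (PySem.Str.strIsdigit (PySem.Str.strip s) &&
            decide (1 ≤ (PySem.Int.ofStr? (PySem.Str.strip s)).getD 0)) = false := by
          have : rthCond lines a = false := eq_false_of_ne_true hc
          simpa [rthCond, hs] using this
        have hfind : (PySem.List.pyRange a (lines.length : Int) 1).find? (rthCond lines) =
            (PySem.List.pyRange (a+1) (lines.length : Int) 1).find? (rthCond lines) := by
          rw [PySem.List.pyRange_one_cons ha, List.find?_cons_of_neg (by simp [hc])]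
        have ih1 := ih (a+1) acc (by omega) (by omega)
        have ih2 := ih (a+1) (acc ++ [PySem.Str.strip s]) (by omega) (by omega)
        simp only [rthLoopA, hs]
        rw [if_neg (by simp only [hcond]; simp)]
        simp only [read_table_headers_py_alt] at ih1 ih2 ⊢
        rw [hfind]
        cases hdsc : (PySem.List.pyRange (a+1) ((lines.length : Int)) 1).find? (rthCond lines) with
        | none =>
          rw [hdsc] at ih1 ih2
          rw [PySem.List.pyRange_one_cons ha, List.filterMap_cons]
          by_cases ht : PySem.Str.strip s = ""
          · simp [ht, rthKeep, hs, ih1]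
          · simp [ht, rthKeep, hs, ih2]
        | some d =>
          have hmem := List.mem_of_find?_eq_some hdsc
          rw [PySem.List.mem_pyRange_one] at hmem
          rw [hdsc] at ih1 ih2
          rw [PySem.List.pyRange_one_cons (show a < d by omega), List.filterMap_cons]
          by_cases ht : PySem.Str.strip s = ""
          · simp [ht, rthKeep, hs, ih1]
          · simp [ht, rthKeep, hs, ih2]

-- ===== VERDICT (by name: the statement is the Claim_ definition above) =====
theorem read_table_headers_py_spec : Claim_equal_read_table_headers_py := by
  intro lines header_idx _ hpre
  unfold Spec_read_table_headers_py read_table_headers_py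
  exact rth_main lines ((lines.length : Int) - header_idx).toNat header_idx [] (le_refl _) hpre
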